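-- pv_equiv track=rewrite | github.com/DinkinsX/Digital-Signature-Algorithm-s | rsaAlg.py | calculating_a_mutually_prime_number
-- ===== SOURCE A (Python) =====
-- def calculating_a_mutually_prime_number(b):
-- 	b2 = b
-- 	for i in range(2, b):
-- 		a = i
-- 		b = b2
-- 		while a != 0 and b != 0:
-- 		    if a > b:
-- 		        a = a % b
-- 		    else:
-- 		        b = b % a
-- 		if a == 1 or b == 1:
-- 			return i
-- ===== SOURCE B (Python) =====
-- def is_prime(p):
--     if p < 2:
--         return False
--     d = 2
--     while d * d <= p:
--         if p % d == 0:
--             return False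
--         d += 1
--     return True
--
--
-- def calculating_a_mutually_prime_number(b):
--     # The smallest integer >= 2 coprime to b is the smallest prime not dividing b,
--     # so scan candidates and test only primes with a plain divisibility check.
--     p = 2
--     while p < b:
--         if is_prime(p) and b % p != 0:
--             return p
--         p += 1
--     return None
-- ===== Notes on version B (the rewrite author's own statement) =====
-- stated objective: alternative
-- what changed: Instead of testing every candidate i in [2,b) for coprimality with an inline Euclidean gcd loop, B scans the same candidates but tests only primes (trial-division primality check) with a single divisibility test b % p != 0, exploiting that the smallest integer >= 2 coprime to b is the smallest prime not dividing b.
import Mathlib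
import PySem

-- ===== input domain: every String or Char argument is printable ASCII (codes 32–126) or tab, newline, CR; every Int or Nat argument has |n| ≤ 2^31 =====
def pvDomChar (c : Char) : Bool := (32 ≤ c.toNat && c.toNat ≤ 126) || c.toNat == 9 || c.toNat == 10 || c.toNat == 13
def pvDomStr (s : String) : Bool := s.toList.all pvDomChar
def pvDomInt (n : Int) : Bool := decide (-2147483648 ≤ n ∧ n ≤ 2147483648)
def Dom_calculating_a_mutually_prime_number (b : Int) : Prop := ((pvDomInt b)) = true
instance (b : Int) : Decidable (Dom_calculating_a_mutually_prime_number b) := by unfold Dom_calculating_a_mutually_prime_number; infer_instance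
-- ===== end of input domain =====

-- B replaces A's scan of all integers with an inline Euclidean gcd by a scan that tests
-- only primes with a single divisibility check (objective: alternative algorithm).

-- ===== PORT A =====
-- A's inner while-loop (Euclid by repeated mod).  It is only ever entered with the
-- positive values i ∈ [2,b) and b2 = b ≥ 3, where Python's % equals Nat %, so the
-- Nat transliteration below is exact on every reachable state.
def pvEuclid (a b : Nat) : Nat × Nat :=
  if _h : a ≠ 0 ∧ b ≠ 0 then
    if a > b then pvEuclid (a % b) b else pvEuclid a (b % a)
  else (a, b)
termination_by a + b
decreasing_by
  · have := Nat.mod_lt a (show 0 < b by omega); omega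
  · have := Nat.mod_lt b (show 0 < a by omega); omega

-- the for-loop over range(2, b) with its early return
def pvALoop (b2 : Int) : List Int → Option Int
  | [] => none
  | i :: rest =>
    let r := pvEuclid i.toNat b2.toNat
    if r.1 = 1 ∨ r.2 = 1 then some i else pvALoop b2 rest

def calculating_a_mutually_prime_number (b : Int) : Option Int :=
  pvALoop b (PySem.List.pyRange 2 b 1)

-- ===== PORT B =====
-- trial-division loop of Source B's is_prime: d runs from 2 while d*d ≤ p (exact Nat
-- transliteration; is_prime is only called with p ≥ 2)
def pvTrial (p d : Nat) : Bool :=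
  if d * d ≤ p then (if p % d = 0 then false else pvTrial p (d + 1)) else true
termination_by p + 1 - d
decreasing_by
  rename_i h
  rcases Nat.eq_zero_or_pos d with h0 | h0
  · omega
  · have := Nat.le_mul_of_pos_left d h0; omega

def pvIsPrime (p : Int) : Bool :=
  if p < 2 then false else pvTrial p.toNat 2

-- the while p < b loop of Source B
def pvBLoop (b p : Int) : Option Int :=
  if p < b then
    if pvIsPrime p && PySem.Int.mod b p ≠ 0 then some p else pvBLoop b (p + 1)
  else none
termination_by (b - p).toNat
decreasing_by omega

def calculating_a_mutually_prime_number_alt (b : Int) : Option Int :=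
  pvBLoop b 2

-- ===== PRECONDITION & SPEC =====
def Spec_calculating_a_mutually_prime_number (b : Int) (out : Option Int) : Prop := out = calculating_a_mutually_prime_number_alt b
instance (b : Int) (out : Option Int) : Decidable (Spec_calculating_a_mutually_prime_number b out) := by unfold Spec_calculating_a_mutually_prime_number; infer_instance

-- ===== CLAIM (what is proved, stated in full; the proofs are below) =====
def Claim_equal_calculating_a_mutually_prime_number : Prop := ∀ (b : Int), Dom_calculating_a_mutually_prime_number b → Spec_calculating_a_mutually_prime_number b (calculating_a_mutually_prime_number b)

-- ===== LEMMAS AND PROOFS =====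

-- the Euclid loop ends with (gcd, 0) or (0, gcd)
theorem pvEuclid_gcd (a b : Nat) :
    Nat.gcd (pvEuclid a b).1 (pvEuclid a b).2 = Nat.gcd a b ∧
    ((pvEuclid a b).1 = 0 ∨ (pvEuclid a b).2 = 0) := by
  fun_induction pvEuclid a b with
  | case1 a b h hgt ih =>
    refine ⟨?_, ih.2⟩
    rw [ih.1, ← Nat.gcd_rec b a, Nat.gcd_comm]
  | case2 a b h hgt ih =>
    refine ⟨?_, ih.2⟩
    rw [ih.1, Nat.gcd_comm a (b % a), ← Nat.gcd_rec a b]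
  | case3 a b h =>
    exact ⟨rfl, by show a = 0 ∨ b = 0; omega⟩

-- A's test "a == 1 or b == 1" after the loop is exactly coprimality
theorem pvEuclid_test (a b : Nat) :
    ((pvEuclid a b).1 = 1 ∨ (pvEuclid a b).2 = 1) ↔ Nat.gcd a b = 1 := by
  obtain ⟨hg, hz⟩ := pvEuclid_gcd a b
  rcases hz with h | h <;> rw [h] at hg <;> simp [h, ← hg]

-- trial division from d finds a divisor iff one exists in [d, √p]
theorem pvTrial_iff (p d : Nat) :
    pvTrial p d = true ↔ ∀ m, d ≤ m → m * m ≤ p → ¬ m ∣ p := by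
  fun_induction pvTrial p d with
  | case1 d hle hmod =>
    simp only [Bool.false_eq_true, false_iff]
    intro h
    exact h d (le_refl d) hle (Nat.dvd_of_mod_eq_zero hmod)
  | case2 d hle hmod ih =>
    rw [ih]
    constructor
    · intro h m hm hmm
      rcases Nat.eq_or_lt_of_le hm with h1 | h1
      · subst h1
        intro hdvd
        exact hmod (Nat.dvd_iff_mod_eq_zero.mp hdvd)
      · exact h m (by omega) hmm
    · intro h m hm hmm
      exact h m (by omega) hmm
  | case3 d hle =>
    simp only [true_iff]
    intro m hm hmm
    exact absurd (le_trans (Nat.mul_le_mul hm hm) hmm) hle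

theorem pvIsPrime_iff (p : Int) (h2 : 2 ≤ p) : pvIsPrime p = true ↔ Nat.Prime p.toNat := by
  have hn : 2 ≤ p.toNat := by omega
  rw [pvIsPrime, if_neg (by omega), pvTrial_iff]
  rw [Nat.prime_def_le_sqrt]
  constructor
  · intro h
    exact ⟨hn, fun m hm hms => h m hm ((Nat.le_sqrt).1 hms)⟩
  · intro h m hm hmm
    exact h.2 m hm ((Nat.le_sqrt).2 hmm)

-- the smallest i ≥ 2 coprime to b is a prime not dividing b
theorem pvMinCoprime (i b : Nat) (h2 : 2 ≤ i) (hg : Nat.gcd i b = 1)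
    (hmin : ∀ j, 2 ≤ j → j < i → Nat.gcd j b ≠ 1) : Nat.Prime i ∧ ¬ i ∣ b := by
  have hndvd : ¬ i ∣ b := by
    intro hdvd
    have : i ∣ Nat.gcd i b := Nat.dvd_gcd dvd_rfl hdvd
    rw [hg] at this
    have h3 := Nat.le_of_dvd one_pos this
    omega
  refine ⟨?_, hndvd⟩
  obtain ⟨q, hq, hqd⟩ := Nat.exists_prime_and_dvd (show i ≠ 1 by omega)
  have hqc : Nat.gcd q b = 1 := by
    have h1 : Nat.gcd q b ∣ Nat.gcd i b :=
      Nat.dvd_gcd ((Nat.gcd_dvd_left q b).trans hqd) (Nat.gcd_dvd_right q b)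
    rw [hg] at h1
    exact Nat.eq_one_of_dvd_one h1
  have hqle : q ≤ i := Nat.le_of_dvd (by omega) hqd
  rcases Nat.eq_or_lt_of_le hqle with h | h
  · rwa [← h]
  · exact absurd hqc (hmin q hq.two_le h)

-- lockstep lemma: once every j ∈ [2,p) has failed A's coprimality test, the two
-- remaining loops return the same thing
theorem pvLoop_eq (b p : Int) (h2 : 2 ≤ p)
    (hmin : ∀ j : Int, 2 ≤ j → j < p → Nat.gcd j.toNat b.toNat ≠ 1) :
    pvALoop b (PySem.List.pyRange p b 1) = pvBLoop b p := by
  by_cases hpb : p < b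
  · rw [PySem.List.pyRange_one_cons hpb, pvALoop, pvBLoop, if_pos hpb]
    have hb2 : 2 ≤ b.toNat := by omega
    have hp2 : 2 ≤ p.toNat := by omega
    have hplt : p.toNat < b.toNat := by omega
    have hbc : ((b.toNat : Int)) = b := by omega
    have hpc : ((p.toNat : Int)) = p := by omega
    -- B's test in Nat terms
    have hmod : PySem.Int.mod b p = ((b.toNat % p.toNat : Nat) : Int) := by
      rw [← hbc, ← hpc, PySem.Int.mod_natCast]
      simp
    have hBtest : (pvIsPrime p && PySem.Int.mod b p ≠ 0) = true ↔
        (Nat.Prime p.toNat ∧ ¬ p.toNat ∣ b.toNat) := by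
      rw [Bool.and_eq_true, pvIsPrime_iff p h2, hmod]
      have : ((b.toNat % p.toNat : Nat) : Int) ≠ 0 ↔ ¬ p.toNat ∣ b.toNat := by
        rw [Nat.dvd_iff_mod_eq_zero]
        omega
      simp only [decide_eq_true_eq, this]
    by_cases hg : Nat.gcd p.toNat b.toNat = 1
    · -- first hit: both return p
      have hmin' : ∀ j : Nat, 2 ≤ j → j < p.toNat → Nat.gcd j b.toNat ≠ 1 := by
        intro j hj hjlt
        have := hmin (j : Int) (by omega) (by omega)
        simpa using this
      obtain ⟨hp, hnd⟩ := pvMinCoprime p.toNat b.toNat hp2 hg hmin'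
      rw [if_pos ((pvEuclid_test p.toNat b.toNat).2 hg), if_pos (hBtest.2 ⟨hp, hnd⟩)]
    · -- no hit at p: both step to p+1
      have hA : ¬ ((pvEuclid p.toNat b.toNat).1 = 1 ∨ (pvEuclid p.toNat b.toNat).2 = 1) := by
        rw [pvEuclid_test]; exact hg
      have hB : ¬ (pvIsPrime p && PySem.Int.mod b p ≠ 0) = true := by
        rw [hBtest]
        rintro ⟨hp, hnd⟩
        exact hg ((Nat.Prime.coprime_iff_not_dvd hp).2 hnd)
      rw [if_neg hA, if_neg hB]
      exact pvLoop_eq b (p + 1) (by omega) (by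
        intro j hj hjlt
        rcases lt_or_eq_of_le (show j ≤ p by omega) with h | h
        · exact hmin j hj h
        · subst h; exact hg)
  · rw [PySem.List.pyRange_one_eq_nil (by omega), pvALoop, pvBLoop, if_neg hpb]
termination_by (b - p).toNat
decreasing_by omega

-- ===== VERDICT (by name: the statement is the Claim_ definition above) =====
theorem calculating_a_mutually_prime_number_spec : Claim_equal_calculating_a_mutually_prime_number := by
  intro b _
  show _ = _
  rw [calculating_a_mutually_prime_number, calculating_a_mutually_prime_number_alt]
  exact pvLoop_eq b 2 (le_refl 2) (by intro j h1 h2; omega)
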